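-- pv_equiv track=rewrite | github.com/jngmk/Training | Python/Programmers/[2020카카오공채] 괄호 변환/solution.py | is_balance
-- ===== SOURCE A (Python) =====
-- def is_balance(parenthesis):
--     left, right = 0, 0
--
--     length = len(parenthesis)
--     for i in range(length):
--         if parenthesis[i] == '(':
--             left += 1
--         else:
--             right += 1
--
--         if left == right: return i + 1
--
--     return length
-- ===== SOURCE B (Python) =====
-- def is_balance(parenthesis):
--     # Parity argument: the running balance after i characters has the same
--     # parity as i, so it can only be zero at even positions.  Hence it
--     # suffices to stride over the string two characters at a time and test
--     # the balance only at even positions; a trailing odd character can never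
--     # complete a balanced prefix.
--     n = len(parenthesis)
--     k = 0
--     bal = 0
--     while k + 1 < n:
--         bal += 1 if parenthesis[k] == '(' else -1
--         bal += 1 if parenthesis[k + 1] == '(' else -1
--         k += 2
--         if bal == 0:
--             return k
--     return n
-- ===== Notes on version B (the rewrite author's own statement) =====
-- stated objective: alternative
-- what changed: A scans one character at a time with two counters and tests left==right after every character; B uses the parity invariant (the balance can only be zero at even positions) to stride over the string two characters at a time with a single balance accumulator, testing only at even positions and never examining a trailing odd character's effect on the result.
import Mathlib
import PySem

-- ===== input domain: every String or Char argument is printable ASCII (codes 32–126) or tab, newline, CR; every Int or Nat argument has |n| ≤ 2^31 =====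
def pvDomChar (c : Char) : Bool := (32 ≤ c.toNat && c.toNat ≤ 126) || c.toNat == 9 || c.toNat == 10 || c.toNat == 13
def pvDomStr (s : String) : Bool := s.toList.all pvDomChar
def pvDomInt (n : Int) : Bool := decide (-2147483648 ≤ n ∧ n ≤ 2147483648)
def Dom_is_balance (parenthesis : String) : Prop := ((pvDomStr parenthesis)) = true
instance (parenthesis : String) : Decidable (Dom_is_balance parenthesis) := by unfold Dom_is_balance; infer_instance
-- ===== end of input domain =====

-- B replaces A's per-character scan with two counters by a two-character-stride
-- scan with one balance accumulator, testing only at even positions (parity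
-- invariant: the balance can be zero only after an even number of characters).
-- Objective: alternative decomposition, same O(n) cost.

-- ===== PORT A =====
-- A's for-loop over indices with counters left/right and an early return i+1.
def isBalanceLoopA (cs : List Char) (i left right len : Int) : Int :=
  match cs with
  | [] => len
  | c :: rest =>
    let left' := if c = '(' then left + 1 else left
    let right' := if c = '(' then right else right + 1
    if left' = right' then i + 1 else isBalanceLoopA rest (i + 1) left' right' len

def is_balance (parenthesis : String) : Int :=
  isBalanceLoopA parenthesis.toList 0 0 0 (parenthesis.toList.length : Int)

-- ===== PORT B =====
-- Source B's while loop: consume two characters per step, test the balance only there;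
-- fewer than two characters left (the `while k + 1 < n` guard) falls through to n.
def pairLoopB (cs : List Char) (k bal n : Int) : Int :=
  match cs with
  | c1 :: c2 :: rest =>
    let b := bal + (if c1 = '(' then 1 else -1) + (if c2 = '(' then 1 else -1)
    if b = 0 then k + 2 else pairLoopB rest (k + 2) b n
  | _ => n

def is_balance_alt (parenthesis : String) : Int :=
  pairLoopB parenthesis.toList 0 0 (parenthesis.toList.length : Int)

-- ===== PRECONDITION & SPEC =====
def Spec_is_balance (parenthesis : String) (out : Int) : Prop := out = is_balance_alt parenthesis
instance (parenthesis : String) (out : Int) : Decidable (Spec_is_balance parenthesis out) := by unfold Spec_is_balance; infer_instance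

-- ===== CLAIM (what is proved, stated in full; the proofs are below) =====
def Claim_equal_is_balance : Prop := ∀ (parenthesis : String), Dom_is_balance parenthesis → Spec_is_balance parenthesis (is_balance parenthesis)

-- ===== LEMMAS AND PROOFS =====
-- Invariant: when left - right is even, A's mid-pair test can never fire
-- (the balance is odd after an odd step), so A's loop equals B's pair loop.
theorem loopA_eq_pair : ∀ (cs : List Char) (i l r len : Int),
    (l - r) % 2 = 0 → isBalanceLoopA cs i l r len = pairLoopB cs i (l - r) len
  | [], _, _, _, _, _ => by rfl
  | [c], i, l, r, len, h => by
    simp only [isBalanceLoopA, pairLoopB]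
    by_cases hc : c = '(' <;>
      · simp only [hc, reduceIte]
        rw [if_neg (by omega)]
  | c1 :: c2 :: rest, i, l, r, len, h => by
    simp only [isBalanceLoopA, pairLoopB]
    by_cases h1 : c1 = '(' <;> by_cases h2 : c2 = '(' <;>
      · simp only [h1, h2, reduceIte]
        rw [if_neg (by omega)]
        split
        · rename_i h3
          rw [if_pos (by omega)]
          omega
        · rename_i h3
          rw [if_neg (by omega), loopA_eq_pair rest _ _ _ _ (by omega)]
          congr 1 <;> omega

-- ===== VERDICT (by name: the statement is the Claim_ definition above) =====
theorem is_balance_spec : Claim_equal_is_balance := by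
  intro p _
  show is_balance p = is_balance_alt p
  unfold is_balance is_balance_alt
  rw [loopA_eq_pair _ _ _ _ _ (by omega)]
  norm_num
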